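-- pv_equiv track=rewrite | github.com/jwhong/DiceRoller | Graph.py | determineIncrement
-- ===== SOURCE A (Python) =====
-- from collections import Counter
--
-- def determineIncrement(counter:Counter)->int:
--     # Create a new counter of the deltas between adjacent values
--     sorted_unique_vals = sorted(counter.keys())
--     if len(sorted_unique_vals) == 1: return 1
--     sorted_unique_deltas = sorted(sorted_unique_vals[i+1]-sorted_unique_vals[i] for i in range(len(sorted_unique_vals)-1))
--     # Now we need to find the largest integer which divides into all deltas
--     for span in range(sorted_unique_deltas[0], 0, -1):
--         if all(d % span == 0 for d in sorted_unique_deltas):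
--             return span
--     assert(False, "Should never get here!")
-- ===== SOURCE B (Python) =====
-- def _gcd(a, b):
--     while b:
--         a, b = b, a % b
--     return a
--
-- def determineIncrement(counter):
--     vals = sorted(counter.keys())
--     if len(vals) == 1:
--         return 1
--     g = 0
--     prev = vals[0]
--     for v in vals[1:]:
--         g = _gcd(g, v - prev)
--         prev = v
--     return g
-- ===== Notes on version B (the rewrite author's own statement) =====
-- stated objective: alternative
-- what changed: Replaces A's build-all-deltas-then-sort-then-downward-trial-division search with a single fused pass over the sorted keys that maintains a running GCD via a hand-written Euclidean algorithm.
import Mathlib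
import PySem

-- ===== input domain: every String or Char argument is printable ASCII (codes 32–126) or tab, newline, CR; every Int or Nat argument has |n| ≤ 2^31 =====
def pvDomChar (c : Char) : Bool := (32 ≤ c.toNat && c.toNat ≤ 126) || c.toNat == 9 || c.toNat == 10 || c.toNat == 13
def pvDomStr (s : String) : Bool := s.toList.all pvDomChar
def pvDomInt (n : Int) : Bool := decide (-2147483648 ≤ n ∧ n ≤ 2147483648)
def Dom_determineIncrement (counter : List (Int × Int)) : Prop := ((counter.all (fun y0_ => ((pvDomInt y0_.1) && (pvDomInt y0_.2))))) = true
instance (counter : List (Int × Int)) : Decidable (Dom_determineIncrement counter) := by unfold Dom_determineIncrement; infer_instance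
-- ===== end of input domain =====

-- B fuses A's build-deltas/sort/downward-trial-division search into one pass over the sorted keys with a running Euclidean GCD.

-- ===== PORT A =====
-- the 'for span in range(deltas[0], 0, -1): if all(...): return span' loop; fall-through (unreachable under Pre_) gives 0
def spanLoop (spans deltas : List Int) : Int :=
  match spans with
  | [] => 0
  | s :: rest => if deltas.all (fun d => PySem.Int.mod d s == 0) then s else spanLoop rest deltas

def determineIncrement (counter : List (Int × Int)) : Int :=
  let vals := PySem.List.sorted (PySem.Dict.mk counter).keys (fun x => x) false
  if vals.length == 1 then 1
  else
    let deltas := PySem.List.sorted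
      ((PySem.List.pyRange 0 ((vals.length : Int) - 1) 1).map
        (fun i => PySem.List.pyGetD vals (i + 1) 0 - PySem.List.pyGetD vals i 0))
      (fun x => x) false
    spanLoop (PySem.List.pyRange (PySem.List.pyGetD deltas 0 0) 0 (-1)) deltas

-- ===== PORT B =====
-- hand-written Euclid: while b: a, b = b, a % b; return a
def egcd (a b : Int) : Int :=
  if h : b = 0 then a else egcd b (PySem.Int.mod a b)
termination_by b.natAbs
decreasing_by
  rcases lt_trichotomy b 0 with hb | hb | hb
  · have h1 := PySem.Int.mod_neg_bounds (a := a) hb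
    omega
  · exact absurd hb h
  · have h1 := PySem.Int.mod_nonneg (a := a) hb
    have h2 := PySem.Int.mod_lt (a := a) hb
    omega

def determineIncrement_alt (counter : List (Int × Int)) : Int :=
  let vals := PySem.List.sorted (PySem.Dict.mk counter).keys (fun x => x) false
  if vals.length == 1 then 1
  else
    ((PySem.List.slice vals (some 1) none).foldl
      (fun (s : Int × Int) v => (egcd s.1 (v - s.2), v))
      (0, PySem.List.pyGetD vals 0 0)).1

-- ===== PRECONDITION & SPEC =====
-- Pre_ excludes the empty counter (A raises IndexError on deltas[0]; B raises the same on vals[0]) and lists whose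
-- first components repeat (a Python Counter/dict cannot have duplicate keys, so such lists encode no Python input).
def Pre_determineIncrement (counter : List (Int × Int)) : Prop :=
  counter ≠ [] ∧ (counter.map Prod.fst).Nodup
instance (counter : List (Int × Int)) : Decidable (Pre_determineIncrement counter) := by unfold Pre_determineIncrement; infer_instance
def pvWitness_determineIncrement : (List (Int × Int)) := [(4, 2), (10, 1), (7, 3)]

def Spec_determineIncrement (counter : List (Int × Int)) (out : Int) : Prop := out = determineIncrement_alt counter
instance (counter : List (Int × Int)) (out : Int) : Decidable (Spec_determineIncrement counter out) := by unfold Spec_determineIncrement; infer_instance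

-- ===== CLAIM (what is proved, stated in full; the proofs are below) =====
def Claim_equal_determineIncrement : Prop := ∀ (counter : List (Int × Int)), Dom_determineIncrement counter → Pre_determineIncrement counter → Spec_determineIncrement counter (determineIncrement counter)

-- ===== LEMMAS AND PROOFS =====

-- adjacent differences of prev :: l
def adjDiffs (prev : Int) (l : List Int) : List Int :=
  match l with
  | [] => []
  | v :: r => (v - prev) :: adjDiffs v r

-- the gcd step A's search characterises and B's Euclid computes
def gcdf (a b : Int) : Int := (Int.gcd a b : Int)

theorem egcd_eq_gcd (a b : Int) (ha : 0 ≤ a) (hb : 0 ≤ b) : egcd a b = gcdf a b := by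
  by_cases h : b = 0
  · subst h
    rw [egcd]
    simp [gcdf, Int.gcd, Int.natAbs_of_nonneg ha]
  · have hbpos : 0 < b := lt_of_le_of_ne hb (Ne.symm h)
    rw [egcd, dif_neg h, PySem.Int.mod_eq_emod_of_pos hbpos]
    rw [egcd_eq_gcd b (a % b) hb (Int.emod_nonneg a h)]
    unfold gcdf
    congr 1
    have h1 : a % b = a + (-(a / b)) * b := by rw [Int.emod_def]; ring
    rw [h1, Int.gcd_add_mul_right_right, Int.gcd_comm]
termination_by b.natAbs
decreasing_by
  have h2 := Int.emod_nonneg a h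
  have h3 := Int.emod_lt_of_pos a hbpos
  omega

theorem foldl_egcd_eq_foldl_gcdf (l : List Int) (a : Int) (ha : 0 ≤ a) (hl : ∀ d ∈ l, 0 ≤ d) :
    l.foldl egcd a = l.foldl gcdf a := by
  induction l generalizing a with
  | nil => rfl
  | cons d r ih =>
    simp only [List.foldl_cons]
    rw [egcd_eq_gcd a d ha (hl d (by simp))]
    exact ih _ (Int.natCast_nonneg _) (fun x hx => hl x (by simp [hx]))

theorem B_loop_eq (l : List Int) (g prev : Int) :
    (l.foldl (fun (s : Int × Int) v => (egcd s.1 (v - s.2), v)) (g, prev)).1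
      = (adjDiffs prev l).foldl egcd g := by
  induction l generalizing g prev with
  | nil => rfl
  | cons v r ih => simpa [adjDiffs] using ih (egcd g (v - prev)) v

theorem adjDiffs_eq_range_map (p : Int) (t : List Int) :
    (List.range t.length).map
        (fun k => (p :: t).getD (k + 1) 0 - (p :: t).getD k 0) = adjDiffs p t := by
  induction t generalizing p with
  | nil => rfl
  | cons v r ih =>
    rw [adjDiffs]
    simp only [List.length_cons, List.range_succ_eq_map, List.map_cons, List.map_map]
    refine congrArg₂ List.cons ?_ ?_
    · simp
    · rw [← ih v]
      rfl

theorem adjDiffs_pos (p : Int) (t : List Int) (h : (p :: t).Pairwise (· < ·)) :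
    ∀ d ∈ adjDiffs p t, 0 < d := by
  induction t generalizing p with
  | nil => simp [adjDiffs]
  | cons v r ih =>
    intro d hd
    rw [adjDiffs] at hd
    rcases List.mem_cons.mp hd with h1 | h1
    · have hpv : p < v := (List.pairwise_cons.mp h).1 v (by simp)
      omega
    · exact ih v (List.pairwise_cons.mp h).2 d h1

theorem foldl_gcdf_nonneg (l : List Int) (a : Int) (ha : 0 ≤ a) : 0 ≤ l.foldl gcdf a := by
  induction l generalizing a with
  | nil => exact ha
  | cons d r ih => exact ih _ (Int.natCast_nonneg _)

theorem foldl_gcdf_dvd_init (l : List Int) (a : Int) : l.foldl gcdf a ∣ a := by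
  induction l generalizing a with
  | nil => exact dvd_refl a
  | cons d r ih => exact dvd_trans (ih (gcdf a d)) (Int.gcd_dvd_left a d)

theorem foldl_gcdf_dvd_mem (l : List Int) (a d : Int) (hd : d ∈ l) : l.foldl gcdf a ∣ d := by
  induction l generalizing a with
  | nil => simp at hd
  | cons e r ih =>
    rcases List.mem_cons.mp hd with h1 | h1
    · subst h1
      exact dvd_trans (foldl_gcdf_dvd_init r (gcdf a d)) (Int.gcd_dvd_right a d)
    · exact ih _ h1

theorem dvd_foldl_gcdf (l : List Int) (a s : Int) (hsnn : 0 ≤ s) (hs : s ∣ a) (hl : ∀ d ∈ l, s ∣ d) :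
    s ∣ l.foldl gcdf a := by
  induction l generalizing a with
  | nil => exact hs
  | cons d r ih =>
    refine ih _ ?_ (fun x hx => hl x ?_)
    · show s ∣ ((Int.gcd a d : Nat) : Int)
      have hcast : ((s.toNat : Nat) : Int) = s := Int.toNat_of_nonneg hsnn
      have hnat : s.toNat ∣ Int.gcd a d :=
        Int.dvd_gcd (by rwa [hcast]) (by rw [hcast]; exact hl d (by simp))
      calc s = ((s.toNat : Nat) : Int) := hcast.symm
        _ ∣ ((Int.gcd a d : Nat) : Int) := Int.natCast_dvd_natCast.mpr hnat
    · simp [hx]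

-- A's countdown search returns the fold-gcd G when started at any s ≥ G that G divides into every delta
theorem spanLoop_eq (deltas : List Int) (hne : deltas ≠ []) (hpos : ∀ d ∈ deltas, 0 < d)
    (k : Nat) :
    spanLoop (PySem.List.pyRange (deltas.foldl gcdf 0 + k) 0 (-1)) deltas = deltas.foldl gcdf 0 := by
  have hGpos : 0 < deltas.foldl gcdf 0 := by
    cases deltas with
    | nil => exact absurd rfl hne
    | cons d0 rest =>
      have h1 : (d0 :: rest).foldl gcdf 0 ∣ d0 := foldl_gcdf_dvd_mem _ _ _ (by simp)
      have h2 : 0 ≤ (d0 :: rest).foldl gcdf 0 := foldl_gcdf_nonneg _ _ (le_refl 0)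
      have h3 : 0 < d0 := hpos d0 (by simp)
      rcases h2.lt_or_eq with h4 | h4
      · exact h4
      · rw [← h4] at h1
        simp only [zero_dvd_iff] at h1
        omega
  induction k with
  | zero =>
    rw [Nat.cast_zero, add_zero,
      PySem.List.pyRange_neg_one_cons hGpos, spanLoop, if_pos]
    rw [List.all_eq_true]
    intro d hd
    simpa [PySem.Int.mod_eq_zero_iff_dvd] using foldl_gcdf_dvd_mem deltas 0 d hd
  | succ k ih =>
    have hs : (0:Int) < deltas.foldl gcdf 0 + (k + 1 : Nat) := by
      push_cast; omega
    rw [PySem.List.pyRange_neg_one_cons hs, spanLoop, if_neg]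
    · have he : deltas.foldl gcdf 0 + ((k:Nat) + 1 : Nat) - 1 = deltas.foldl gcdf 0 + (k : Nat) := by
        push_cast; ring
      rw [he]
      exact ih
    · intro hall
      rw [List.all_eq_true] at hall
      have hdvd : (deltas.foldl gcdf 0 + ((k:Nat)+1:Nat)) ∣ deltas.foldl gcdf 0 := by
        apply dvd_foldl_gcdf _ _ _ hs.le (dvd_zero _)
        intro d hd
        have := hall d hd
        simpa [PySem.Int.mod_eq_zero_iff_dvd] using this
      have := Int.le_of_dvd hGpos hdvd
      push_cast at this
      omega

theorem gcdf_left_comm (a b c : Int) : gcdf (gcdf a b) c = gcdf (gcdf a c) b := by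
  simp only [gcdf, Int.gcd_def, Int.natAbs_natCast]
  rw [Nat.gcd_assoc, Nat.gcd_comm b.natAbs, ← Nat.gcd_assoc]


-- both bodies, for an arbitrary strictly increasing nonempty vals (what sorted unique keys are)
theorem core_eq (vals : List Int) (hvne : vals ≠ []) (hlt : vals.Pairwise (· < ·)) :
    (if vals.length == 1 then (1 : Int) else
      spanLoop
        (PySem.List.pyRange
          (PySem.List.pyGetD
            (PySem.List.sorted
              ((PySem.List.pyRange 0 ((vals.length : Int) - 1) 1).map
                (fun i => PySem.List.pyGetD vals (i + 1) 0 - PySem.List.pyGetD vals i 0))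
              (fun x => x) false) 0 0) 0 (-1))
        (PySem.List.sorted
          ((PySem.List.pyRange 0 ((vals.length : Int) - 1) 1).map
            (fun i => PySem.List.pyGetD vals (i + 1) 0 - PySem.List.pyGetD vals i 0))
          (fun x => x) false))
    = (if vals.length == 1 then (1 : Int) else
        ((PySem.List.slice vals (some 1) none).foldl
          (fun (s : Int × Int) v => (egcd s.1 (v - s.2), v)) (0, PySem.List.pyGetD vals 0 0)).1) := by
  by_cases h1 : vals.length = 1
  · simp [h1]
  · have hb : (vals.length == 1) = false := by simp [h1]
    rw [hb]
    simp only [Bool.false_eq_true, if_false]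
    cases vals with
    | nil => exact absurd rfl hvne
    | cons v0 t =>
      have htne : t ≠ [] := by
        intro h
        subst h
        simp at h1
      -- A's unsorted delta list is adjDiffs v0 t
      have harg : ((((v0 :: t).length : Nat) : Int) - 1) = ((t.length : Nat) : Int) := by
        simp [List.length_cons]
      have hmap : ((PySem.List.pyRange 0 (((v0 :: t).length : Int) - 1) 1).map
          (fun i => PySem.List.pyGetD (v0 :: t) (i + 1) 0 - PySem.List.pyGetD (v0 :: t) i 0))
          = adjDiffs v0 t := by
        rw [harg, PySem.List.pyRange_zero_nat, List.map_map, ← adjDiffs_eq_range_map]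
        apply List.map_congr_left
        intro k _
        have hcast : ((k : Int) + 1) = ((k + 1 : Nat) : Int) := by push_cast; ring
        simp only [Function.comp_apply, hcast, PySem.List.pyGetD_natCast]
      rw [hmap]
      have hltt : (v0 :: t).Pairwise (· < ·) := hlt
      have hLpos : ∀ d ∈ adjDiffs v0 t, 0 < d := adjDiffs_pos v0 t hltt
      have hLne : adjDiffs v0 t ≠ [] := by
        cases t with
        | nil => exact absurd rfl htne
        | cons v r => simp [adjDiffs]
      have hperm : (PySem.List.sorted (adjDiffs v0 t) (fun x => x) false).Perm (adjDiffs v0 t) :=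
        PySem.List.sorted_perm _ _ _
      have hdpos : ∀ d ∈ PySem.List.sorted (adjDiffs v0 t) (fun x => x) false, 0 < d :=
        fun d hd => hLpos d (hperm.mem_iff.mp hd)
      have hdne : PySem.List.sorted (adjDiffs v0 t) (fun x => x) false ≠ [] := by
        rw [Ne, PySem.List.sorted_eq_nil_iff]
        exact hLne
      set deltas := PySem.List.sorted (adjDiffs v0 t) (fun x => x) false with hdel
      haveI : RightCommutative gcdf := ⟨fun b a a' => gcdf_left_comm b a a'⟩
      have hGfold : deltas.foldl gcdf 0 = (adjDiffs v0 t).foldl gcdf 0 := hperm.foldl_eq 0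
      obtain ⟨e, es, hd⟩ : ∃ e es, deltas = e :: es := by
        cases hx : deltas with
        | nil => exact absurd hx hdne
        | cons e es => exact ⟨e, es, rfl⟩
      have hd0 : PySem.List.pyGetD deltas 0 0 = e := by
        rw [hd]
        exact PySem.List.pyGetD_zero_cons e es 0
      have he_mem : e ∈ deltas := by rw [hd]; simp
      have hepos : 0 < e := hdpos e he_mem
      have hGdvde : deltas.foldl gcdf 0 ∣ e := foldl_gcdf_dvd_mem _ _ _ he_mem
      have hGnn : 0 ≤ deltas.foldl gcdf 0 := foldl_gcdf_nonneg _ _ le_rfl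
      have hGpos : 0 < deltas.foldl gcdf 0 := by
        rcases hGnn.lt_or_eq with h4 | h4
        · exact h4
        · rw [← h4] at hGdvde
          simp only [zero_dvd_iff] at hGdvde
          omega
      have hGle : deltas.foldl gcdf 0 ≤ e := Int.le_of_dvd hepos hGdvde
      have hk : e = deltas.foldl gcdf 0 + (((e - deltas.foldl gcdf 0).toNat : Nat) : Int) := by
        omega
      rw [hd0, hk, spanLoop_eq deltas hdne hdpos _]
      -- B side
      rw [PySem.List.slice_from_one, List.tail_cons, PySem.List.pyGetD_zero_cons,
        B_loop_eq t 0 v0, foldl_egcd_eq_foldl_gcdf _ 0 le_rfl (fun d hdm => (hLpos d hdm).le)]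
      exact hGfold

-- ===== VERDICT (by name: the statement is the Claim_ definition above) =====
theorem determineIncrement_spec : Claim_equal_determineIncrement := by
  intro counter _ hpre
  obtain ⟨hne, hnodup⟩ := hpre
  have hkeysnd : (PySem.Dict.mk counter).keys.Nodup := by
    rw [PySem.Dict.keys_mk]
    exact hnodup
  have h1 : PySem.List.sorted (PySem.Dict.mk counter).keys (fun x => x) false ≠ [] := by
    rw [Ne, PySem.List.sorted_eq_nil_iff, PySem.Dict.keys_mk, List.map_eq_nil_iff]
    exact hne
  have hnd : (PySem.List.sorted (PySem.Dict.mk counter).keys (fun x => x) false).Nodup :=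
    (PySem.List.sorted_perm _ _ _).nodup_iff.mpr hkeysnd
  have hle : (PySem.List.sorted (PySem.Dict.mk counter).keys (fun x => x) false).Pairwise (· ≤ ·) :=
    PySem.List.sorted_pairwise _ _
  have h2 : (PySem.List.sorted (PySem.Dict.mk counter).keys (fun x => x) false).Pairwise (· < ·) :=
    (hle.and hnd).imp (fun h => lt_of_le_of_ne h.1 h.2)
  exact core_eq _ h1 h2
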